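-- pv_equiv track=rewrite | github.com/Alaric53/Phshing_filter | ruleset.py | lookalike_domain_check
-- ===== SOURCE A (Python) =====
-- SAFE_DOMAINS = [
--     # Government
--     "gov.sg", "moh.gov.sg", "cpf.gov.sg", "singpass.gov.sg",
--     # Banks
--     "dbs.com.sg", "ocbc.com", "uobgroup.com", "hsbc.com.sg", "standardchartered.com.sg",
--     # Universities
--     "sit.edu.sg", "ntu.edu.sg", "nus.edu.sg", "smu.edu.sg", "suss.edu.sg",
--     # Healthcare
--     "singhealth.com.sg", "kkh.com.sg", "nhg.com.sg", "ttsh.com.sg", "nuhs.edu.sg", "nccs.com.sg", "sgmc.com.sg",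
--     "changi.sghealth.org", "cgh.com.sg", "sgh.com.sg",
--     # Major online shopping sites
--     "amazon.com", "amazon.sg", "shopee.sg", "lazada.sg", "qoo10.sg",
--     "aliexpress.com", "ebay.com", "taobao.com",
--     # International brands
--     "microsoft.com", "google.com",  "apple.com", "paypal.com",
-- ]
--
-- def levenshtein_distance(a,b):                    # genuinely just copy pasted this
--     dp = [[0] * (len(b)+1) for _ in range(len(a)+1)]
--     for i in range(len(a)+1):
--         for j in range(len(b)+1):
--             if i == 0:
--                 dp[i][j] = j
--             elif j == 0:
--                 dp[i][j] = i
--             elif a[i-1] == b[j-1]: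
--                 dp[i][j] = dp[i-1][j-1]
--             else:
--                 dp[i][j] = 1 + min(dp[i-1][j], dp[i][j-1], dp[i-1][j-1])
--
--     return dp[len(a)][len(b)]
--
-- def lookalike_domain_check(domain):             # checker using levenshtein alg
--     if domain in SAFE_DOMAINS:                  # exact match = safe
--         return 0
--     for safe in SAFE_DOMAINS:
--         distance = levenshtein_distance(domain, safe)
--         if distance <= 2:   # small difference means it is suspicious
--             return 3
--     return 0
-- ===== SOURCE B (Python) =====
-- SAFE_DOMAINS = [
--     # Government
--     "gov.sg", "moh.gov.sg", "cpf.gov.sg", "singpass.gov.sg",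
--     # Banks
--     "dbs.com.sg", "ocbc.com", "uobgroup.com", "hsbc.com.sg", "standardchartered.com.sg",
--     # Universities
--     "sit.edu.sg", "ntu.edu.sg", "nus.edu.sg", "smu.edu.sg", "suss.edu.sg",
--     # Healthcare
--     "singhealth.com.sg", "kkh.com.sg", "nhg.com.sg", "ttsh.com.sg", "nuhs.edu.sg", "nccs.com.sg", "sgmc.com.sg",
--     "changi.sghealth.org", "cgh.com.sg", "sgh.com.sg",
--     # Major online shopping sites
--     "amazon.com", "amazon.sg", "shopee.sg", "lazada.sg", "qoo10.sg",
--     "aliexpress.com", "ebay.com", "taobao.com",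
--     # International brands
--     "microsoft.com", "google.com",  "apple.com", "paypal.com",
-- ]
--
-- def levenshtein_distance(a, b):
--     # top-down memoized recursion on prefix lengths instead of a bottom-up matrix
--     memo = {}
--     def go(i, j):
--         if i == 0:
--             return j
--         if j == 0:
--             return i
--         key = (i, j)
--         if key in memo:
--             return memo[key]
--         if a[i-1] == b[j-1]:
--             r = go(i-1, j-1)
--         else:
--             r = 1 + min(go(i-1, j), go(i, j-1), go(i-1, j-1))
--         memo[key] = r
--         return r
--     return go(len(a), len(b))
--
-- def lookalike_domain_check(domain):
--     if domain in SAFE_DOMAINS: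
--         return 0
--     for safe in SAFE_DOMAINS:
--         if levenshtein_distance(domain, safe) <= 2:
--             return 3
--     return 0
-- ===== Notes on version B (the rewrite author's own statement) =====
-- stated objective: alternative
-- what changed: Edit distance is computed by top-down memoized recursion on prefix lengths (only cells actually reached are evaluated) instead of filling a full bottom-up (len(a)+1)x(len(b)+1) matrix.
import Mathlib
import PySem

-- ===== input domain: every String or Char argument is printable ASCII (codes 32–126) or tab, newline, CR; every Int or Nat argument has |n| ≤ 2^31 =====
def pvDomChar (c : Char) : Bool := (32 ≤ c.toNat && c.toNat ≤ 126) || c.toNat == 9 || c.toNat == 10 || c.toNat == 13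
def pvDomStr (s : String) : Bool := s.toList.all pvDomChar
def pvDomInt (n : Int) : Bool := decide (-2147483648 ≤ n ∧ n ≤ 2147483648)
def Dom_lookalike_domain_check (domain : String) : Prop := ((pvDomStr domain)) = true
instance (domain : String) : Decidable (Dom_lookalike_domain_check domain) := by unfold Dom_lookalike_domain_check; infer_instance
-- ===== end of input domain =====

-- B replaces A's bottom-up (n+1)x(m+1) Levenshtein matrix by top-down memoized recursion
-- on prefix lengths (objective: alternative decomposition, same worst-case cost).

def pvSAFE_DOMAINS : List String := [
  "gov.sg", "moh.gov.sg", "cpf.gov.sg", "singpass.gov.sg",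
  "dbs.com.sg", "ocbc.com", "uobgroup.com", "hsbc.com.sg", "standardchartered.com.sg",
  "sit.edu.sg", "ntu.edu.sg", "nus.edu.sg", "smu.edu.sg", "suss.edu.sg",
  "singhealth.com.sg", "kkh.com.sg", "nhg.com.sg", "ttsh.com.sg", "nuhs.edu.sg", "nccs.com.sg", "sgmc.com.sg",
  "changi.sghealth.org", "cgh.com.sg", "sgh.com.sg",
  "amazon.com", "amazon.sg", "shopee.sg", "lazada.sg", "qoo10.sg",
  "aliexpress.com", "ebay.com", "taobao.com",
  "microsoft.com", "google.com", "apple.com", "paypal.com"]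

-- ===== PORT A =====
-- dp[i][j] read (default irrelevant: indices are always in range when used)
def pvCell (dp : List (List Int)) (i j : Nat) : Int := (dp.getD i []).getD j 0

-- the value A assigns to dp[i][j]
-- (a[i-1], b[j-1]: 1 <= i <= len(a), 1 <= j <= len(b) when read, so getD is exact)
def pvVal (al bl : List Char) (i : Nat) (dp : List (List Int)) (j : Nat) : Int :=
  if i == 0 then (j : Int)
  else if j == 0 then (i : Int)
  else if al.getD (i-1) ' ' == bl.getD (j-1) ' ' then pvCell dp (i-1) (j-1)
  else 1 + min (min (pvCell dp (i-1) j) (pvCell dp i (j-1))) (pvCell dp (i-1) (j-1))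

-- body of A's inner `for j` loop: writes dp[i][j] in place
def pvInner (al bl : List Char) (i : Nat) (dp : List (List Int)) (j : Nat) : List (List Int) :=
  dp.set i ((dp.getD i []).set j (pvVal al bl i dp j))

def levenshtein_distance (a b : String) : Int :=
  let al := a.toList
  let bl := b.toList
  let n := al.length
  let m := bl.length
  let dp0 : List (List Int) := List.replicate (n+1) (List.replicate (m+1) 0)
  let dp := (List.range (n+1)).foldl
    (fun dp i => (List.range (m+1)).foldl (pvInner al bl i) dp) dp0
  pvCell dp n m

def pvScanA : List String → String → Int
  | [], _ => 0
  | s :: rest, d => if levenshtein_distance d s ≤ 2 then 3 else pvScanA rest d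

def lookalike_domain_check (domain : String) : Int :=
  if pvSAFE_DOMAINS.contains domain then 0
  else pvScanA pvSAFE_DOMAINS domain

-- ===== PORT B =====
-- B's recursive go(i, j) on prefix lengths, threading the memo dict through the calls
-- (a[i-1], b[j-1] with 1 <= i <= len(a), 1 <= j <= len(b): getD is exact there)
def pvGoMemo (a b : List Char) : Nat → Nat → PySem.Dict (Nat × Nat) Int → Int × PySem.Dict (Nat × Nat) Int
  | 0, j, memo => ((j : Int), memo)
  | i+1, 0, memo => (((i : Int) + 1), memo)
  | i+1, j+1, memo =>
    match memo.get? (i+1, j+1) with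
    | some r => (r, memo)
    | none =>
      if a.getD i ' ' == b.getD j ' ' then
        let p := pvGoMemo a b i j memo
        (p.1, p.2.insert (i+1, j+1) p.1)
      else
        let p1 := pvGoMemo a b i (j+1) memo
        let p2 := pvGoMemo a b (i+1) j p1.2
        let p3 := pvGoMemo a b i j p2.2
        let r := 1 + min (min p1.1 p2.1) p3.1
        (r, p3.2.insert (i+1, j+1) r)
  termination_by i j => (i, j)

def pvLevB (a b : String) : Int :=
  (pvGoMemo a.toList b.toList a.toList.length b.toList.length PySem.Dict.empty).1

def pvScanB : List String → String → Int
  | [], _ => 0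
  | s :: rest, d => if pvLevB d s ≤ 2 then 3 else pvScanB rest d

def lookalike_domain_check_alt (domain : String) : Int :=
  if pvSAFE_DOMAINS.contains domain then 0
  else pvScanB pvSAFE_DOMAINS domain

-- ===== PRECONDITION & SPEC =====
def Spec_lookalike_domain_check (domain : String) (out : Int) : Prop := out = lookalike_domain_check_alt domain
instance (domain : String) (out : Int) : Decidable (Spec_lookalike_domain_check domain out) := by unfold Spec_lookalike_domain_check; infer_instance

-- ===== CLAIM (what is proved, stated in full; the proofs are below) =====
def Claim_equal_lookalike_domain_check : Prop := ∀ (domain : String), Dom_lookalike_domain_check domain → Spec_lookalike_domain_check domain (lookalike_domain_check domain)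

-- ===== LEMMAS AND PROOFS =====

-- the (un-memoized) Levenshtein recurrence, the common specification of both ports
def pvEdit (a b : List Char) : Nat → Nat → Int
  | 0, j => (j : Int)
  | i+1, 0 => ((i : Int) + 1)
  | i+1, j+1 =>
    if a.getD i ' ' == b.getD j ' ' then pvEdit a b i j
    else 1 + min (min (pvEdit a b i (j+1)) (pvEdit a b (i+1) j)) (pvEdit a b i j)
  termination_by i j => (i, j)

-- the memoized recursion computes pvEdit, provided every memo entry is correct
theorem pvGoMemo_spec (a b : List Char) (i j : Nat) (memo : PySem.Dict (Nat × Nat) Int) :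
    (∀ p r, memo.get? p = some r → r = pvEdit a b p.1 p.2) →
    (pvGoMemo a b i j memo).1 = pvEdit a b i j ∧
    (∀ p r, (pvGoMemo a b i j memo).2.get? p = some r → r = pvEdit a b p.1 p.2) := by
  fun_induction pvGoMemo a b i j memo with
  | case1 j memo => intro hm; exact ⟨by rw [pvEdit], hm⟩
  | case2 i memo => intro hm; exact ⟨by rw [pvEdit], hm⟩
  | case3 i j memo r hr =>
    intro hm
    exact ⟨by simpa using hm (i+1, j+1) r hr, hm⟩
  | case4 i j memo hn hc p ih =>
    intro hm
    obtain ⟨h1, h2⟩ := ih hm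
    have e : p = pvGoMemo a b i j memo := rfl
    simp only [e, Nat.succ_eq_add_one]
    have hval : (pvGoMemo a b i j memo).1 = pvEdit a b (i+1) (j+1) := by
      rw [pvEdit, if_pos hc]; exact h1
    refine ⟨hval, ?_⟩
    intro q r' hq
    rw [PySem.Dict.get?_insert] at hq
    split at hq
    · cases hq
      subst ‹q = (i+1, j+1)›
      simpa using hval
    · exact h2 q r' hq
  | case5 i j memo hn hc p1 p2 p3 r ih1 ih2 ih3 ih4 =>
    intro hm
    obtain ⟨h11, h12⟩ := ih1 hm
    obtain ⟨h21, h22⟩ := ih3 h12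
    obtain ⟨h31, h32⟩ := ih4 h22
    have e1 : p1 = pvGoMemo a b i (j+1) memo := rfl
    have e2 : p2 = pvGoMemo a b (i+1) j p1.2 := rfl
    have e3 : p3 = pvGoMemo a b i j p2.2 := rfl
    have e4 : r = 1 + min (min p1.1 p2.1) p3.1 := rfl
    simp only [e4, e3, e2, e1, Nat.succ_eq_add_one]
    have hval : 1 + min (min (pvGoMemo a b i (j+1) memo).1
        (pvGoMemo a b (i+1) j (pvGoMemo a b i (j+1) memo).2).1)
        (pvGoMemo a b i j (pvGoMemo a b (i+1) j (pvGoMemo a b i (j+1) memo).2).2).1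
        = pvEdit a b (i+1) (j+1) := by
      rw [pvEdit, if_neg hc, h11, h21, h31]
    refine ⟨hval, ?_⟩
    intro q r' hq
    rw [PySem.Dict.get?_insert] at hq
    split at hq
    · cases hq
      subst ‹q = (i+1, j+1)›
      simpa using hval
    · exact h32 q r' hq

theorem pvLevB_eq (a b : String) :
    pvLevB a b = pvEdit a.toList b.toList a.toList.length b.toList.length := by
  exact (pvGoMemo_spec a.toList b.toList _ _ PySem.Dict.empty (by simp [PySem.Dict.get?_empty])).1

-- shape invariant of the dp table
def pvShape (n m : Nat) (dp : List (List Int)) : Prop :=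
  dp.length = n + 1 ∧ ∀ r, r < n + 1 → (dp.getD r []).length = m + 1

theorem pvCell_set_same (dp : List (List Int)) (i j : Nat) (v : Int)
    (hi : i < dp.length) (hj : j < (dp.getD i []).length) :
    pvCell (dp.set i ((dp.getD i []).set j v)) i j = v := by
  have hj' : j < (dp[i]?.getD []).length := hj
  simp [pvCell, List.getD, List.getElem?_set_self hi, List.getElem?_set_self hj']

theorem pvCell_set_other_row (dp : List (List Int)) (i j r : Nat) (v : Int) (hr : r ≠ i) :
    (dp.set i ((dp.getD i []).set j v)).getD r [] = dp.getD r [] := by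
  simp [List.getD, List.getElem?_set_ne (Ne.symm hr)]

theorem pvCell_set_other_col (dp : List (List Int)) (i j j' : Nat) (v : Int)
    (hi : i < dp.length) (hj : j' ≠ j) :
    pvCell (dp.set i ((dp.getD i []).set j v)) i j' = pvCell dp i j' := by
  simp [pvCell, List.getD, List.getElem?_set_self hi, List.getElem?_set_ne (Ne.symm hj)]

theorem pvShape_set (n m : Nat) (dp : List (List Int)) (i j : Nat) (v : Int)
    (hs : pvShape n m dp) : pvShape n m (dp.set i ((dp.getD i []).set j v)) := by
  obtain ⟨h1, h2⟩ := hs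
  refine ⟨by simpa using h1, fun r hr => ?_⟩
  by_cases hri : r = i
  · subst hri
    by_cases hlt : r < dp.length
    · simp [List.getD, List.getElem?_set_self hlt]
      exact h2 r hr
    · rw [List.set_eq_of_length_le (by omega : dp.length ≤ r)]
      exact h2 r hr
  · rw [pvCell_set_other_row dp i j r v hri]
    exact h2 r hr

-- inner loop: fills row i cells j0 .. j0+k-1 with the edit-distance values
theorem pvInner_inv (al bl : List Char) (i : Nat) :
    ∀ (k j0 : Nat) (dp : List (List Int)),
    j0 + k ≤ bl.length + 1 →
    i < al.length + 1 →
    pvShape al.length bl.length dp →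
    (∀ j', j' < j0 → pvCell dp i j' = pvEdit al bl i j') →
    (i ≠ 0 → ∀ j', j' ≤ bl.length → pvCell dp (i-1) j' = pvEdit al bl (i-1) j') →
    pvShape al.length bl.length ((List.range' j0 k).foldl (pvInner al bl i) dp) ∧
    (∀ r, r ≠ i → ((List.range' j0 k).foldl (pvInner al bl i) dp).getD r [] = dp.getD r []) ∧
    (∀ j', j' < j0 + k → pvCell ((List.range' j0 k).foldl (pvInner al bl i) dp) i j' = pvEdit al bl i j') := by
  intro k
  induction k with
  | zero =>
    intro j0 dp hk hi hs hcur hprev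
    exact ⟨hs, fun r _ => rfl, fun j' hj' => hcur j' (by omega)⟩
  | succ k ih =>
    intro j0 dp hk hi hs hcur hprev
    have hi' : i < dp.length := by rw [hs.1]; exact hi
    have hrowlen : (dp.getD i []).length = bl.length + 1 := hs.2 i hi
    have hj0 : j0 < bl.length + 1 := by omega
    -- the freshly written cell carries the edit-distance value
    have hv : pvVal al bl i dp j0 = pvEdit al bl i j0 := by
      unfold pvVal
      match i, j0 with
      | 0, j0 => simp [pvEdit]
      | i'+1, 0 =>
        rw [pvEdit]; simp
      | i'+1, j''+1 =>
        have hprev' := hprev (by omega)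
        rw [pvEdit]
        simp only [Nat.add_sub_cancel, beq_iff_eq, Nat.succ_ne_zero, if_false]
        by_cases hc : al.getD i' ' ' = bl.getD j'' ' '
        · rw [if_pos (by simpa using hc), if_pos (by simpa using hc)]
          exact hprev' j'' (by omega)
        · rw [if_neg (by simpa using hc), if_neg (by simpa using hc)]
          have h1 := hprev' (j''+1) (by omega)
          have h3 := hprev' j'' (by omega)
          simp only [Nat.add_sub_cancel] at h1 h3
          rw [h1, hcur j'' (by omega), h3]
    have hd1 : pvInner al bl i dp j0 = dp.set i ((dp.getD i []).set j0 (pvVal al bl i dp j0)) := rfl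
    have hs1 : pvShape al.length bl.length (pvInner al bl i dp j0) := by
      rw [hd1]; exact pvShape_set _ _ _ _ _ _ hs
    have hrow1 : ∀ r, r ≠ i → (pvInner al bl i dp j0).getD r [] = dp.getD r [] := by
      intro r hr; rw [hd1]; exact pvCell_set_other_row dp i j0 r (pvVal al bl i dp j0) hr
    have hcur1 : ∀ j', j' < j0 + 1 → pvCell (pvInner al bl i dp j0) i j' = pvEdit al bl i j' := by
      intro j' hj'
      by_cases hjj : j' = j0
      · subst hjj
        rw [hd1, pvCell_set_same dp i j' _ hi' (by omega), hv]
      · rw [hd1, pvCell_set_other_col dp i j0 j' _ hi' hjj]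
        exact hcur j' (by omega)
    have hprev1 : i ≠ 0 → ∀ j', j' ≤ bl.length → pvCell (pvInner al bl i dp j0) (i-1) j' = pvEdit al bl (i-1) j' := by
      intro hi0 j' hj'
      unfold pvCell
      rw [hrow1 (i-1) (by omega)]
      exact hprev hi0 j' hj'
    have hrec := ih (j0+1) (pvInner al bl i dp j0) (by omega) hi hs1 hcur1 hprev1
    rw [List.range'_succ, List.foldl_cons]
    refine ⟨hrec.1, ?_, fun j' hj' => hrec.2.2 j' (by omega)⟩
    intro r hr
    rw [hrec.2.1 r hr, hrow1 r hr]

-- outer loop: after rows i0 .. i0+k-1, the last processed row holds edit-distance values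
theorem pvOuter_inv (al bl : List Char) :
    ∀ (k i0 : Nat) (dp : List (List Int)),
    i0 + k ≤ al.length + 1 →
    pvShape al.length bl.length dp →
    (i0 ≠ 0 → ∀ j, j ≤ bl.length → pvCell dp (i0-1) j = pvEdit al bl (i0-1) j) →
    pvShape al.length bl.length
      ((List.range' i0 k).foldl (fun dp i => (List.range (bl.length+1)).foldl (pvInner al bl i) dp) dp) ∧
    (k ≠ 0 → ∀ j, j ≤ bl.length →
      pvCell ((List.range' i0 k).foldl (fun dp i => (List.range (bl.length+1)).foldl (pvInner al bl i) dp) dp) (i0+k-1) j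
        = pvEdit al bl (i0+k-1) j) := by
  intro k
  induction k with
  | zero =>
    intro i0 dp hk hs hprev
    exact ⟨hs, fun h => absurd rfl h⟩
  | succ k ih =>
    intro i0 dp hk hs hprev
    rw [List.range'_succ, List.foldl_cons]
    have hinner := pvInner_inv al bl i0 (bl.length+1) 0 dp (by omega) (by omega) hs
      (fun j' h => absurd h (by omega)) hprev
    have hrow : ∀ j, j ≤ bl.length →
        pvCell ((List.range' 0 (bl.length+1)).foldl (pvInner al bl i0) dp) i0 j = pvEdit al bl i0 j :=
      fun j hj => hinner.2.2 j (by omega)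
    rw [← List.range_eq_range'] at hinner hrow
    have hrec := ih (i0+1) ((List.range (bl.length+1)).foldl (pvInner al bl i0) dp) (by omega) hinner.1
      (fun _ j hj => hrow j hj)
    refine ⟨hrec.1, fun _ j hj => ?_⟩
    match k with
    | 0 => exact hrow j hj
    | k'+1 =>
      have h := hrec.2 (Nat.succ_ne_zero k') j hj
      have hidx : i0 + 1 + (k' + 1) - 1 = i0 + (k' + 1 + 1) - 1 := by omega
      rwa [hidx] at h

theorem pvLev_eq (a b : String) : levenshtein_distance a b = pvLevB a b := by
  have hs0 : pvShape a.toList.length b.toList.length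
      (List.replicate (a.toList.length+1) (List.replicate (b.toList.length+1) (0:Int))) := by
    refine ⟨by simp, fun r hr => ?_⟩
    have hr' : r ≤ a.length := by simpa using Nat.lt_succ_iff.mp hr
    simp [List.getD, hr']
  have h := pvOuter_inv a.toList b.toList (a.toList.length+1) 0 _ (by omega) hs0 (fun h => absurd rfl h)
  have hrow := h.2 (by omega) b.toList.length (le_refl _)
  have hidx : 0 + (a.toList.length + 1) - 1 = a.toList.length := by omega
  rw [hidx] at hrow
  rw [pvLevB_eq]
  unfold levenshtein_distance
  simp only [← List.range_eq_range'] at hrow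
  exact hrow

theorem pvScan_eq (l : List String) (d : String) : pvScanA l d = pvScanB l d := by
  induction l with
  | nil => rfl
  | cons s rest ih => simp [pvScanA, pvScanB, pvLev_eq, ih]

-- ===== VERDICT (by name: the statement is the Claim_ definition above) =====
theorem lookalike_domain_check_spec : Claim_equal_lookalike_domain_check := by
  intro domain _
  unfold Spec_lookalike_domain_check lookalike_domain_check lookalike_domain_check_alt
  split
  · rfl
  · exact pvScan_eq _ _
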